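-- pv_equiv track=rewrite | github.com/FeelingXD/algorithm | beakjoon/1599.py | minsik_word
-- ===== SOURCE A (Python) =====
-- def minsik_word(w: str):
--     # c -> k 로 변경하는경우 민식어에서 k는 c의 우선순위를 가진다.
--     # ng 문자는 n -> ng -> o 의 우선순위를 가진다.
--     tmp = ""
--     before_n = False
--     for i in range(len(w)):
--         if before_n:
--             before_n = False
--             if w[i] == "g":  # ng 의경우
--                 tmp += "n"
--                 continue
--             else:
--                 tmp += "m"  # 아닐경우 우선순위를 먼저 변경해준다.
--         match w[i]:
--             case "n":
--                 before_n = True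
--             case "k":
--                 tmp += "c"
--             case "l":
--                 tmp += "j"
--             case "m":
--                 tmp += "l"
--             case wildcard:  # default 와일드카드
--                 tmp += wildcard
--     if before_n:
--         tmp += "m"
--     return tmp
-- ===== SOURCE B (Python) =====
-- def minsik_word(w: str):
--     table = {"k": "c", "l": "j", "m": "l", "n": "m"}
--     out = []
--     i = 0
--     n = len(w)
--     while i < n:
--         if w[i] == "n" and i + 1 < n and w[i + 1] == "g":
--             out.append("n")
--             i += 2
--         else:
--             out.append(table.get(w[i], w[i]))
--             i += 1
--     return "".join(out)
-- ===== Notes on version B (the rewrite author's own statement) =====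
-- stated objective: alternative
-- what changed: Replaced A's one-character-at-a-time state machine with a deferred boolean flag by a table-driven lookahead tokenizer: a dict maps single letters and the two-letter digraph is consumed as one token by looking one character ahead, so no carried flag or end-of-loop flush is needed.
import Mathlib
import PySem

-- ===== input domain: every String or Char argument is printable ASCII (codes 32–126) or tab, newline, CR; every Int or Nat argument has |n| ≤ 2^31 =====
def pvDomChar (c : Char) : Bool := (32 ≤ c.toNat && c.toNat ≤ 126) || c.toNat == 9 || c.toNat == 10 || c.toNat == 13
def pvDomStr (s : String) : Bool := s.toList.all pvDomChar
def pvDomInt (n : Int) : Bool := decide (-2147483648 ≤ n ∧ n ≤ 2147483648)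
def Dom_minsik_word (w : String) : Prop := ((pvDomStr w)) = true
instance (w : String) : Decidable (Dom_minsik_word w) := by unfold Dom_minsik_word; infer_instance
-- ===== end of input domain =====

-- B replaces A's boolean-flag state machine with a table-driven tokenizer that consumes the digraph by lookahead; same outputs, same cost.

-- ===== PORT A =====
-- A's for-loop over the characters with accumulator tmp and flag before_n, as structural recursion.
def minsikGoA (tmp : List Char) (bn : Bool) : List Char → List Char
  | [] => if bn then tmp ++ ['m'] else tmp
  | c :: rest =>
    if bn then
      if c = 'g' then minsikGoA (tmp ++ ['n']) false rest
      else
        -- falls through to the match with tmp += "m"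
        if c = 'n' then minsikGoA (tmp ++ ['m']) true rest
        else if c = 'k' then minsikGoA (tmp ++ ['m', 'c']) false rest
        else if c = 'l' then minsikGoA (tmp ++ ['m', 'j']) false rest
        else if c = 'm' then minsikGoA (tmp ++ ['m', 'l']) false rest
        else minsikGoA (tmp ++ ['m', c]) false rest
    else
      if c = 'n' then minsikGoA tmp true rest
      else if c = 'k' then minsikGoA (tmp ++ ['c']) false rest
      else if c = 'l' then minsikGoA (tmp ++ ['j']) false rest
      else if c = 'm' then minsikGoA (tmp ++ ['l']) false rest
      else minsikGoA (tmp ++ [c]) false rest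

def minsik_word (w : String) : String := String.mk (minsikGoA [] false w.toList)

-- ===== PORT B =====
-- table.get(c, c)
def minsikTable (c : Char) : Char :=
  if c = 'k' then 'c' else if c = 'l' then 'j' else if c = 'm' then 'l'
  else if c = 'n' then 'm' else c

-- B's while-loop with lookahead, as recursion: 'n','g' is one token.
def minsikGoB : List Char → List Char
  | [] => []
  | [c] => [minsikTable c]
  | c :: d :: rest =>
    if c = 'n' ∧ d = 'g' then 'n' :: minsikGoB rest
    else minsikTable c :: minsikGoB (d :: rest)

def minsik_word_alt (w : String) : String := String.mk (minsikGoB w.toList)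

-- ===== PRECONDITION & SPEC =====
def Spec_minsik_word (w : String) (out : String) : Prop := out = minsik_word_alt w
instance (w : String) (out : String) : Decidable (Spec_minsik_word w out) := by unfold Spec_minsik_word; infer_instance

-- ===== CLAIM (what is proved, stated in full; the proofs are below) =====
def Claim_equal_minsik_word : Prop := ∀ (w : String), Dom_minsik_word w → Spec_minsik_word w (minsik_word w)

-- ===== LEMMAS AND PROOFS =====

theorem minsikGoB_cons_ne_n (c : Char) (l : List Char) (h : c ≠ 'n') :
    minsikGoB (c :: l) = minsikTable c :: minsikGoB l := by
  cases l with
  | nil => simp [minsikGoB]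
  | cons d rest => simp [minsikGoB, h]

theorem minsikGoA_eq (l : List Char) : ∀ tmp : List Char,
    minsikGoA tmp false l = tmp ++ minsikGoB l ∧
    minsikGoA tmp true l = tmp ++ minsikGoB ('n' :: l) := by
  induction l with
  | nil => intro tmp; simp [minsikGoA, minsikGoB, minsikTable]
  | cons c rest ih =>
    intro tmp
    constructor
    · by_cases hn : c = 'n'
      · subst hn
        simpa [minsikGoA] using (ih tmp).2
      · rw [minsikGoB_cons_ne_n c rest hn]
        by_cases hk : c = 'k' <;> by_cases hl : c = 'l' <;> by_cases hm : c = 'm' <;>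
          simp_all [minsikGoA, minsikTable, (ih _).1]
    · by_cases hg : c = 'g'
      · subst hg
        simp [minsikGoA, minsikGoB, (ih _).1]
      · have hng : minsikGoB ('n' :: c :: rest) = 'm' :: minsikGoB (c :: rest) := by
          simp [minsikGoB, hg, minsikTable]
        rw [hng]
        by_cases hn : c = 'n'
        · subst hn
          simpa [minsikGoA, hg] using (ih (tmp ++ ['m'])).2
        · rw [minsikGoB_cons_ne_n c rest hn]
          by_cases hk : c = 'k' <;> by_cases hl : c = 'l' <;> by_cases hm : c = 'm' <;>
            simp_all [minsikGoA, minsikTable, (ih _).1]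

-- ===== VERDICT (by name: the statement is the Claim_ definition above) =====
theorem minsik_word_spec : Claim_equal_minsik_word := by
  intro w _
  unfold Spec_minsik_word minsik_word minsik_word_alt
  rw [(minsikGoA_eq w.toList []).1]
  simp
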